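-- pv_equiv track=rewrite | github.com/edo9k/learn | python/advent-of-code-2024/02/part2.py | asc_or_desc
-- ===== SOURCE A (Python) =====
-- A = "ASC"
--
-- D = "DESC"
--
-- def tuple_pairs(lst):
--
--     pairs = []
--     last_item = None
--
--     for item in lst:
--         if last_item is None:
--             last_item = item
--             continue
--
--         pairs.append((last_item, item))
--
--         last_item = item
--
--     return pairs
--
-- def asc_or_desc(lst):
--
--     tuples = tuple_pairs(lst)
--
--     asc = 0
--     desc = 0
--
--     for t in tuples:
--         a, b = t
--
--         if increasing(a, b):
--             asc += 1
--
--         if decreasing(a, b):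
--             desc += 1
--
--     if asc > desc:
--         return A
--     if asc < desc:
--         return D
--
--     return None
--
-- def increasing(a, b):
--     return a < b
--
-- def decreasing(a, b):
--     return a > b
-- ===== SOURCE B (Python) =====
-- def asc_or_desc(lst):
--     # Divide and conquer: the signed rise/fall balance of a window [i, j)
--     # is the balance of each half plus the comparison of the boundary pair.
--     def net(i, j):
--         if j - i < 2:
--             return 0
--         m = (i + j) // 2
--         a, b = lst[m - 1], lst[m]
--         return net(i, m) + ((a < b) - (a > b)) + net(m, j)
--
--     n = net(0, len(lst))
--     if n > 0:
--         return "ASC"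
--     if n < 0:
--         return "DESC"
--     return None
-- ===== Notes on version B (the rewrite author's own statement) =====
-- stated objective: alternative
-- what changed: Replaces A's materialized pairs list and two linear counters by a divide-and-conquer recursion on index windows: the signed rise/fall balance of a window is the balance of its two halves plus the comparison of the boundary pair, and the final sign decides ASC/DESC/None.
import Mathlib
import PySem

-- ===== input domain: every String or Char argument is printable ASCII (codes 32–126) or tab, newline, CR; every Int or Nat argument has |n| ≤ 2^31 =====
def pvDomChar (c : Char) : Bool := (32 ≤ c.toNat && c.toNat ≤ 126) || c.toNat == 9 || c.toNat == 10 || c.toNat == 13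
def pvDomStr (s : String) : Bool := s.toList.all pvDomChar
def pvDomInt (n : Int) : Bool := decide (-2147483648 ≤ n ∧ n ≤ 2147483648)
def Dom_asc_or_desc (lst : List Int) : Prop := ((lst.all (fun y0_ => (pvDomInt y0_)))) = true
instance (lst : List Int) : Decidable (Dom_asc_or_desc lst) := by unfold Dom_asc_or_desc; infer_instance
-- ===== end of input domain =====

-- B replaces A's pairs-list helper plus two linear counters by a divide-and-conquer
-- recursion on index windows (balance of a window = balance of the halves + the
-- boundary comparison); objective: alternative.

-- ===== PORT A =====
-- helper tuple_pairs: loop with a pairs accumulator and an Option last_item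
def tuple_pairs (lst : List Int) : List (Int × Int) :=
  (lst.foldl
    (fun (st : List (Int × Int) × Option Int) item =>
      match st.2 with
      | none => (st.1, some item)
      | some last => (st.1 ++ [(last, item)], some item))
    ([], none)).1

def increasing (a b : Int) : Bool := a < b
def decreasing (a b : Int) : Bool := a > b

def asc_or_desc (lst : List Int) : Option String :=
  let tuples := tuple_pairs lst
  let st := tuples.foldl
    (fun (st : Int × Int) t =>
      let asc := if increasing t.1 t.2 then st.1 + 1 else st.1
      let desc := if decreasing t.1 t.2 then st.2 + 1 else st.2
      (asc, desc))
    (0, 0)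
  if st.1 > st.2 then some "ASC"
  else if st.1 < st.2 then some "DESC"
  else none

-- ===== PORT B =====
-- net(i, j) of Source B; Python's lst[m-1], lst[m] are always in range at the call
-- sites (i + 2 ≤ j ≤ len lst), so getD is exact there.
def netRange (lst : List Int) (i j : Nat) : Int :=
  if _h : j - i < 2 then 0
  else
    let m := (i + j) / 2
    let a := lst.getD (m - 1) 0
    let b := lst.getD m 0
    netRange lst i m + ((if a < b then (1 : Int) else 0) - (if a > b then (1 : Int) else 0)) + netRange lst m j
termination_by j - i
decreasing_by all_goals omega

def asc_or_desc_alt (lst : List Int) : Option String :=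
  let n := netRange lst 0 lst.length
  if n > 0 then some "ASC"
  else if n < 0 then some "DESC"
  else none

-- ===== PRECONDITION & SPEC =====
def Spec_asc_or_desc (lst : List Int) (out : Option String) : Prop := out = asc_or_desc_alt lst
instance (lst : List Int) (out : Option String) : Decidable (Spec_asc_or_desc lst out) := by unfold Spec_asc_or_desc; infer_instance

-- ===== CLAIM (what is proved, stated in full; the proofs are below) =====
def Claim_equal_asc_or_desc : Prop := ∀ (lst : List Int), Dom_asc_or_desc lst → Spec_asc_or_desc lst (asc_or_desc lst)

-- ===== LEMMAS AND PROOFS =====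

-- the signed comparison of the adjacent pair starting at index k
def pairSign (lst : List Int) (k : Nat) : Int :=
  (if lst.getD k 0 < lst.getD (k + 1) 0 then (1 : Int) else 0) -
  (if lst.getD k 0 > lst.getD (k + 1) 0 then (1 : Int) else 0)

-- B's divide-and-conquer net equals the sum of pairSign over the window
theorem netRange_eq_sum (lst : List Int) :
    ∀ (n i j : Nat), j - i ≤ n →
      netRange lst i j = ((List.range' i (j - i - 1)).map (pairSign lst)).sum := by
  intro n
  induction n with
  | zero =>
    intro i j h
    rw [netRange]
    rw [dif_pos (by omega)]
    have : j - i - 1 = 0 := by omega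
    simp [this]
  | succ n ih =>
    intro i j h
    rw [netRange]
    by_cases h2 : j - i < 2
    · rw [dif_pos h2]
      have : j - i - 1 = 0 := by omega
      simp [this]
    · rw [dif_neg h2]
      dsimp only
      set m := (i + j) / 2 with hm
      have him : i + 1 ≤ m := by omega
      have hmj : m + 1 ≤ j := by omega
      rw [ih i m (by omega), ih m j (by omega)]
      have hsplit : List.range' i (j - i - 1) =
          List.range' i (m - i - 1) ++ List.range' (m - 1) 1 ++ List.range' m (j - m - 1) := by
        have hp : m - 1 = i + (m - i - 1) := by omega
        have hq : m = i + (m - i - 1) + 1 := by omega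
        have hr : j - i - 1 = (m - i - 1) + (1 + (j - m - 1)) := by omega
        calc List.range' i (j - i - 1)
            = List.range' i ((m - i - 1) + (1 + (j - m - 1))) := by rw [← hr]
          _ = List.range' i (m - i - 1) ++
                (List.range' (i + (m - i - 1)) 1 ++ List.range' (i + (m - i - 1) + 1) (j - m - 1)) := by
              have h1 : List.range' (i + (m - i - 1)) 1 ++ List.range' (i + (m - i - 1) + 1) (j - m - 1) =
                  List.range' (i + (m - i - 1)) (1 + (j - m - 1)) := List.range'_append_1
              have h2 : List.range' i (m - i - 1) ++ List.range' (i + (m - i - 1)) (1 + (j - m - 1)) =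
                  List.range' i (m - i - 1 + (1 + (j - m - 1))) := List.range'_append_1
              rw [h1, h2]
          _ = List.range' i (m - i - 1) ++ List.range' (m - 1) 1 ++ List.range' m (j - m - 1) := by
              rw [← hp, show m - 1 + 1 = m from by omega, List.append_assoc]
      rw [hsplit]
      simp only [List.map_append, List.sum_append, List.range'_one, List.map_cons,
        List.map_nil, List.sum_cons, List.sum_nil]
      unfold pairSign
      have : m - 1 + 1 = m := by omega
      rw [this]
      ring

-- A's tuple_pairs, once the first element has been consumed, produces the zip of the
-- list with its tail.
theorem tuple_pairs_loop (lst : List Int) (acc : List (Int × Int)) (last : Int) :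
    (lst.foldl
      (fun (st : List (Int × Int) × Option Int) item =>
        match st.2 with
        | none => (st.1, some item)
        | some l => (st.1 ++ [(l, item)], some item))
      (acc, some last)) =
    (acc ++ (last :: lst).zip lst, some (lst.getLastD last)) := by
  induction lst generalizing acc last with
  | nil => simp
  | cons x xs ih =>
    simp only [List.foldl, List.zip_cons_cons]
    rw [ih]
    cases xs <;> simp [List.getLast?_cons]

theorem tuple_pairs_eq (lst : List Int) : tuple_pairs lst = lst.zip (lst.drop 1) := by
  cases lst with
  | nil => simp [tuple_pairs]
  | cons x xs =>
    unfold tuple_pairs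
    simp only [List.foldl]
    rw [tuple_pairs_loop]
    simp

-- A's two counters collapse to a single signed sum
theorem count_net (pairs : List (Int × Int)) (asc desc : Int) :
    asc - desc + (pairs.map (fun p =>
        (if p.1 < p.2 then (1 : Int) else 0) - (if p.1 > p.2 then (1 : Int) else 0))).sum =
    (pairs.foldl
      (fun (st : Int × Int) t =>
        let a := if increasing t.1 t.2 then st.1 + 1 else st.1
        let d := if decreasing t.1 t.2 then st.2 + 1 else st.2
        (a, d))
      (asc, desc)).1 -
    (pairs.foldl
      (fun (st : Int × Int) t =>
        let a := if increasing t.1 t.2 then st.1 + 1 else st.1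
        let d := if decreasing t.1 t.2 then st.2 + 1 else st.2
        (a, d))
      (asc, desc)).2 := by
  induction pairs generalizing asc desc with
  | nil => simp
  | cons p ps ih =>
    simp only [List.foldl, List.map_cons, List.sum_cons, increasing, decreasing,
      decide_eq_true_eq]
    simp only [increasing, decreasing, decide_eq_true_eq] at ih
    rcases lt_trichotomy p.1 p.2 with h | h | h
    · rw [if_pos h, if_pos h, if_neg (by omega : ¬ p.1 > p.2), if_neg (by omega : ¬ p.1 > p.2)]
      have := ih (asc + 1) desc
      omega
    · rw [if_neg (by omega : ¬ p.1 < p.2), if_neg (by omega : ¬ p.1 > p.2),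
        if_neg (by omega : ¬ p.1 < p.2), if_neg (by omega : ¬ p.1 > p.2)]
      have := ih asc desc
      omega
    · rw [if_neg (by omega : ¬ p.1 < p.2), if_pos (by omega : p.1 > p.2),
        if_neg (by omega : ¬ p.1 < p.2), if_pos (by omega : p.1 > p.2)]
      have := ih asc (desc + 1)
      omega

-- the zip of adjacent pairs, mapped through the sign, is pairSign over the index range
theorem zip_map_eq_range_map (lst : List Int) :
    (lst.zip (lst.drop 1)).map (fun p =>
        (if p.1 < p.2 then (1 : Int) else 0) - (if p.1 > p.2 then (1 : Int) else 0)) =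
    (List.range' 0 (lst.length - 1)).map (pairSign lst) := by
  apply List.ext_getElem
  · simp [List.length_zip]
  · intro k h1 h2
    simp only [List.getElem_map, List.getElem_zip, List.getElem_range', List.getElem_drop]
    have hk : k < lst.length - 1 := by
      simp [List.length_zip] at h1
      omega
    unfold pairSign
    rw [List.getD_eq_getElem lst 0 (by omega), List.getD_eq_getElem lst 0 (by omega)]
    simp [Nat.add_comm]

-- ===== VERDICT (by name: the statement is the Claim_ definition above) =====
theorem asc_or_desc_spec : Claim_equal_asc_or_desc := by
  intro lst _
  unfold Spec_asc_or_desc asc_or_desc asc_or_desc_alt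
  rw [tuple_pairs_eq]
  rw [netRange_eq_sum lst lst.length 0 lst.length (by omega)]
  have h := count_net (lst.zip (lst.drop 1)) 0 0
  rw [zip_map_eq_range_map] at h
  rw [show lst.length - 0 - 1 = lst.length - 1 from by omega]
  set s := ((List.range' 0 (lst.length - 1)).map (pairSign lst)).sum with hs
  set st := (lst.zip (lst.drop 1)).foldl
      (fun (st : Int × Int) t =>
        let a := if increasing t.1 t.2 then st.1 + 1 else st.1
        let d := if decreasing t.1 t.2 then st.2 + 1 else st.2
        (a, d))
      ((0 : Int), (0 : Int)) with hst
  have hnet : s = st.1 - st.2 := by omega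
  by_cases h1 : st.1 > st.2
  · rw [if_pos h1, if_pos (by omega : s > 0)]
  · rw [if_neg h1, if_neg (by omega : ¬ s > 0)]
    by_cases h2 : st.1 < st.2
    · rw [if_pos h2, if_pos (by omega : s < 0)]
    · rw [if_neg h2, if_neg (by omega : ¬ s < 0)]
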